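-- pv_equiv track=rewrite | github.com/Daishijun/InterviewAlgorithmCoding | kickStart/RoundB19.py | process2
-- ===== SOURCE A (Python) =====
-- def process2(prefix, indexlist):
--     count = 0
--     for [left, right] in indexlist:
--         if right == left:
--             count +=1
--         else:
--             leftpre = prefix[left-1]
--             rightpre = prefix[right]
--             odds = 0
--             for key, value in rightpre.items():
--                 if (value-leftpre[key]) & 1 :
--                     odds +=1
--             if odds<2:
--                 count +=1
--     return count
-- ===== SOURCE B (Python) =====
-- def process2(prefix, indexlist):
--     # Precompute per prefix-dict: the set of keys with odd count, and the key set.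
--     odd = [frozenset(k for k, v in d.items() if v & 1) for d in prefix]
--     keys = [frozenset(d) for d in prefix]
--     count = 0
--     for left, right in indexlist:
--         if right == left:
--             count += 1
--         elif len(keys[right] & (odd[right] ^ odd[left - 1])) < 2:
--             count += 1
--     return count
-- ===== Notes on version B (the rewrite author's own statement) =====
-- stated objective: alternative
-- what changed: A re-scans the right prefix dict and looks each key up in the left dict for every query; B precomputes, once per prefix entry, the set of odd-count keys and the key set, and answers each query with the single set expression len(keys[r] & (odd[r] ^ odd[l-1])) < 2.
import Mathlib
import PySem

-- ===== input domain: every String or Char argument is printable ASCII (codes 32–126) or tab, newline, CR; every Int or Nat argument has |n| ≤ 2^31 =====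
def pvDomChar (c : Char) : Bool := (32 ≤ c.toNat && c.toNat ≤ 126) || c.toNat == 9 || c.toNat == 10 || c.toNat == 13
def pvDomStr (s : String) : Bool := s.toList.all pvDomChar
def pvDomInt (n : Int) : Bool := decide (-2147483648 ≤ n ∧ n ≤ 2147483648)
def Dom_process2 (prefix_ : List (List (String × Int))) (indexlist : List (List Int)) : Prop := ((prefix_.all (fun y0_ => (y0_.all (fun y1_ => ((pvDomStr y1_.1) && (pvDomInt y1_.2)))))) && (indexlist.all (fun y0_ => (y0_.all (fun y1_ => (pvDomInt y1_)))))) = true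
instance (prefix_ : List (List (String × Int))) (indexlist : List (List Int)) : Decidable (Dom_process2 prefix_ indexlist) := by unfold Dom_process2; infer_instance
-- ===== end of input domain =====

-- B replaces A's per-query scan of the right prefix dict (with a dict lookup per key) by
-- precomputed per-prefix odd-count key sets and key sets, answering each query with one
-- set expression |keys[r] ∩ (odd[r] Δ odd[l-1])| < 2 (objective: alternative decomposition).
-- Same return value; no argument is mutated by either version.

-- ===== PORT A =====
def process2 (prefix_ : List (List (String × Int))) (indexlist : List (List Int)) : Int :=
  indexlist.foldl (fun count q =>
    match q with
    | [left, right] =>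
      if right == left then count + 1
      else
        -- prefix[left-1], prefix[right]; KeyError/IndexError excluded by Pre_
        let leftpre : PySem.Dict String Int := PySem.Dict.mk ((PySem.List.pyGet? prefix_ (left - 1)).getD [])
        let rightpre : List (String × Int) := (PySem.List.pyGet? prefix_ right).getD []
        let odds : Int := rightpre.foldl (fun odds kv =>
          if PySem.Int.band (kv.2 - leftpre.getD kv.1 0) 1 != 0 then odds + 1 else odds) 0
        if odds < 2 then count + 1 else count
    | _ => count) 0

-- ===== PORT B =====
-- {k for k, v in d.items() if v & 1}
def pvOddKeys (d : List (String × Int)) : PySem.Set String :=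
  PySem.Set.ofList ((d.filter (fun kv => PySem.Int.band kv.2 1 != 0)).map Prod.fst)

def process2_alt (prefix_ : List (List (String × Int))) (indexlist : List (List Int)) : Int :=
  let odd := prefix_.map pvOddKeys
  let keys := prefix_.map (fun d => PySem.Set.ofList (d.map Prod.fst))
  indexlist.foldl (fun count q =>
    if q.length == 2 then
      let left := q.getD 0 0
      let right := q.getD 1 0
      if right == left then count + 1
      else if PySem.Set.len (PySem.Set.inter ((PySem.List.pyGet? keys right).getD [])
          (PySem.Set.symmDiff ((PySem.List.pyGet? odd right).getD [])
                              ((PySem.List.pyGet? odd (left - 1)).getD []))) < 2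
        then count + 1 else count
    else count) 0

-- ===== PRECONDITION & SPEC =====
-- Pre_ admits exactly the inputs on which Python A returns: each dict of prefix_ has unique keys
-- (the dict representation invariant), every query is a 2-element list, and for a query with
-- right ≠ left both indices are in Python range and the right dict's keys all occur in the left
-- dict (else A raises ValueError/IndexError/KeyError).
def Pre_process2 (prefix_ : List (List (String × Int))) (indexlist : List (List Int)) : Prop :=
  (∀ d ∈ prefix_, (d.map Prod.fst).Nodup) ∧
  ∀ q ∈ indexlist, q.length = 2 ∧
    (q.getD 1 0 = q.getD 0 0 ∨
      (PySem.Raise.InRange prefix_.length (q.getD 0 0 - 1) ∧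
       PySem.Raise.InRange prefix_.length (q.getD 1 0) ∧
       ∀ k ∈ ((PySem.List.pyGet? prefix_ (q.getD 1 0)).getD []).map Prod.fst,
         k ∈ ((PySem.List.pyGet? prefix_ (q.getD 0 0 - 1)).getD []).map Prod.fst))
instance (prefix_ : List (List (String × Int))) (indexlist : List (List Int)) : Decidable (Pre_process2 prefix_ indexlist) := by unfold Pre_process2; infer_instance

def pvWitness_process2 : (List (List (String × Int))) × List (List Int) :=
  ([[("a", 1), ("b", 2)], [("a", 2), ("b", 2)]], [[1, 1], [1, 0], [0, 1]])

def Spec_process2 (prefix_ : List (List (String × Int))) (indexlist : List (List Int)) (out : Int) : Prop := out = process2_alt prefix_ indexlist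
instance (prefix_ : List (List (String × Int))) (indexlist : List (List Int)) (out : Int) : Decidable (Spec_process2 prefix_ indexlist out) := by unfold Spec_process2; infer_instance

-- ===== CLAIM (what is proved, stated in full; the proofs are below) =====
def Claim_equal_process2 : Prop := ∀ (prefix_ : List (List (String × Int))) (indexlist : List (List Int)), Dom_process2 prefix_ indexlist → Pre_process2 prefix_ indexlist → Spec_process2 prefix_ indexlist (process2 prefix_ indexlist)

-- ===== LEMMAS AND PROOFS =====

lemma pyGet?_map {α β : Type} (xs : List α) (f : α → β) (i : Int) :
    PySem.List.pyGet? (xs.map f) i = (PySem.List.pyGet? xs i).map f := by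
  simp [PySem.List.pyGet?, PySem.List.pyIdx?]

-- in a dict with unique keys the value of a key is determined
lemma snd_unique (d : List (String × Int)) (hd : (d.map Prod.fst).Nodup)
    {k : String} {v w : Int} (h1 : (k, v) ∈ d) (h2 : (k, w) ∈ d) : v = w := by
  have hkeys : (PySem.Dict.mk d).keys.Nodup := by simpa [PySem.Dict.keys_mk] using hd
  have e1 := PySem.Dict.get?_of_mem_items (d := PySem.Dict.mk d) h1 hkeys
  have e2 := PySem.Dict.get?_of_mem_items (d := PySem.Dict.mk d) h2 hkeys
  rw [e1] at e2; exact Option.some_injective _ e2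

lemma mem_pvOddKeys (d : List (String × Int)) (hd : (d.map Prod.fst).Nodup)
    {k : String} {v : Int} (hmem : (k, v) ∈ d) :
    (k ∈ pvOddKeys d ↔ PySem.Int.band v 1 ≠ 0) := by
  unfold pvOddKeys
  rw [PySem.Set.mem_ofList]
  constructor
  · intro h
    obtain ⟨q, hq, hfst⟩ := List.mem_map.mp h
    obtain ⟨hqd, hodd⟩ := List.mem_filter.mp hq
    have : q = (k, v) := by
      obtain ⟨k', v'⟩ := q
      cases hfst
      exact Prod.ext rfl (snd_unique d hd hqd hmem)
    rw [this] at hodd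
    simpa using hodd
  · intro h
    exact List.mem_map.mpr ⟨(k, v), List.mem_filter.mpr ⟨hmem, by simpa using h⟩, rfl⟩

-- the per-query core: A's odds count equals B's set-expression size
lemma odds_eq (L R : List (String × Int))
    (hR : (R.map Prod.fst).Nodup) (hL : (L.map Prod.fst).Nodup)
    (hsub : ∀ k ∈ R.map Prod.fst, k ∈ L.map Prod.fst) :
    R.foldl (fun odds kv =>
        if PySem.Int.band (kv.2 - (PySem.Dict.mk L).getD kv.1 0) 1 != 0 then odds + 1 else odds) 0
      = PySem.Set.len (PySem.Set.inter (PySem.Set.ofList (R.map Prod.fst))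
          (PySem.Set.symmDiff (pvOddKeys R) (pvOddKeys L))) := by
  rw [PySem.List.foldl_count_if]
  rw [PySem.Set.ofList_eq_self_of_nodup _ hR]
  have hlen : PySem.Set.len (PySem.Set.inter (R.map Prod.fst)
      (PySem.Set.symmDiff (pvOddKeys R) (pvOddKeys L)))
      = (((R.map Prod.fst).filter
          (fun k => PySem.Set.contains (PySem.Set.symmDiff (pvOddKeys R) (pvOddKeys L)) k)).length : Int) := rfl
  rw [hlen, ← List.countP_eq_length_filter, List.countP_map]
  rw [Int.zero_add]
  congr 1
  apply List.countP_congr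
  intro kv hkv
  have hkmem : kv.1 ∈ R.map Prod.fst := List.mem_map.mpr ⟨kv, hkv, rfl⟩
  obtain ⟨q, hqL, hq1⟩ := List.mem_map.mp (hsub kv.1 hkmem)
  have hget : (PySem.Dict.mk L).get? kv.1 = some q.2 := by
    have hkeys : (PySem.Dict.mk L).keys.Nodup := by simpa [PySem.Dict.keys_mk] using hL
    have : (kv.1, q.2) ∈ L := by rw [← hq1]; exact hqL
    exact PySem.Dict.get?_of_mem_items (d := PySem.Dict.mk L) this hkeys
  have hgetD : (PySem.Dict.mk L).getD kv.1 0 = q.2 :=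
    PySem.Dict.getD_of_get?_eq_some _ _ hget
  have hmR : kv.1 ∈ pvOddKeys R ↔ PySem.Int.band kv.2 1 ≠ 0 :=
    mem_pvOddKeys R hR (by rw [show ((kv.1 : String), kv.2) = kv from rfl]; exact hkv)
  have hmL : kv.1 ∈ pvOddKeys L ↔ PySem.Int.band q.2 1 ≠ 0 :=
    mem_pvOddKeys L hL (by rw [← hq1]; exact hqL)
  rw [Bool.eq_iff_iff]
  simp only [Function.comp, hgetD, PySem.Set.contains_iff, PySem.Set.mem_symmDiff,
    bne_iff_ne, ne_eq, hmR, hmL]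
  rw [PySem.Int.band_one, PySem.Int.band_one, PySem.Int.band_one]
  rw [PySem.Int.mod_eq_emod_of_pos (by norm_num), PySem.Int.mod_eq_emod_of_pos (by norm_num),
      PySem.Int.mod_eq_emod_of_pos (by norm_num)]
  simp only [iff_true]
  omega

-- ===== VERDICT (by name: the statement is the Claim_ definition above) =====
theorem process2_spec : Claim_equal_process2 := by
  intro prefix_ indexlist _hdom hpre
  obtain ⟨hnodup, hq⟩ := hpre
  unfold Spec_process2 process2 process2_alt
  apply PySem.List.foldl_congr_mem'
  intro q hqmem count
  obtain ⟨hlen2, hcond⟩ := hq q hqmem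
  match q, hlen2 with
  | [left, right], _ =>
    simp only [List.getD, List.getElem?_cons_zero, List.getElem?_cons_succ, Option.getD_some] at hcond
    by_cases heq : right == left
    · simp [heq]
    · simp only [heq, Bool.false_eq_true, if_false]
      rcases hcond with hcond | ⟨hinL, hinR, hsub⟩
      · exact absurd (by simpa using hcond) (by simpa using heq)
      · -- both indices are in range: extract the two dicts
        obtain ⟨L, hLget⟩ : ∃ L, PySem.List.pyGet? prefix_ (left - 1) = some L := by
          cases hgl : PySem.List.pyGet? prefix_ (left - 1) with
          | none => exact absurd hinL ((PySem.List.pyGet?_eq_none_iff _ _).mp hgl)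
          | some L => exact ⟨L, rfl⟩
        obtain ⟨R, hRget⟩ : ∃ R, PySem.List.pyGet? prefix_ right = some R := by
          cases hgr : PySem.List.pyGet? prefix_ right with
          | none => exact absurd hinR ((PySem.List.pyGet?_eq_none_iff _ _).mp hgr)
          | some R => exact ⟨R, rfl⟩
        have hLm : L ∈ prefix_ := PySem.List.mem_of_pyGet?_eq_some _ hLget
        have hRm : R ∈ prefix_ := PySem.List.mem_of_pyGet?_eq_some _ hRget
        rw [hLget, hRget] at hsub
        simp only [Option.getD_some] at hsub
        simp only [hLget, hRget, pyGet?_map, Option.map_some, Option.getD_some,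
          List.length_cons, List.length_nil, List.getD, List.getElem?_cons_zero,
          List.getElem?_cons_succ, Option.getD_some]
        simp only [beq_self_eq_true, if_true, heq, Bool.false_eq_true, if_false]
        rw [odds_eq L R (hnodup R hRm) (hnodup L hLm) hsub]
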